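-- pv_equiv track=rewrite | github.com/manman4/OEIS_03 | 376/376756/376756_01.py | A376756
-- ===== SOURCE A (Python) =====
-- def A376756(n):
--     c = 0
--     for x in range(n):
--         z = x**2%n
--         for y in range(x, n):
--             if not (z+y*(x+y))%n:
--                 c += 1
--     return c
-- ===== SOURCE B (Python) =====
-- def A376756(n):
--     # O(n) via completing the square: x^2+xy+y^2 == 0 (mod n)  <=>  (2x+y)^2 + 3y^2 == 0 (mod 4n),
--     # and u^2 mod 4n is 2n-periodic in u, so count ordered pairs with a residue table, then halve.
--     m = 4 * n
--     sq = {}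
--     for u in range(2 * n):
--         k = (u & 1, u * u % m)
--         sq[k] = sq.get(k, 0) + 1
--     ordered = 0
--     diag = 0
--     for y in range(n):
--         ordered += sq.get((y & 1, (-3 * y * y) % m), 0)
--         if 3 * y * y % n == 0:
--             diag += 1
--     return (ordered + diag) // 2
-- ===== Notes on version B (the rewrite author's own statement) =====
-- stated objective: faster
-- what changed: Replaces the O(n^2) double loop by an O(n) completing-the-square count: x^2+xy+y^2=0 mod n iff (2x+y)^2+3y^2=0 mod 4n, so B tabulates u^2 mod 4n per parity over u<2n in a dict, sums the square-root counts for each y, adds the diagonal count and halves.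
import Mathlib
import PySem

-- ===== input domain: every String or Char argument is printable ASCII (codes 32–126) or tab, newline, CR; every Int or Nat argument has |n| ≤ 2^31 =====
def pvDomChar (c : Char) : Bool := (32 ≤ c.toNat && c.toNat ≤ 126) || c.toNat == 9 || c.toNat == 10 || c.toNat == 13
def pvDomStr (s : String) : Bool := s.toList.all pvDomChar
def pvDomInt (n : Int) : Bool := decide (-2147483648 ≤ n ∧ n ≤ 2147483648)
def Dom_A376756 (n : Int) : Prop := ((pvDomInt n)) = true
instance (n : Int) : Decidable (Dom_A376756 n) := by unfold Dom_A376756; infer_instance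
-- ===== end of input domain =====

-- B replaces A's O(n^2) double loop by an O(n) scheme: complete the square
-- (x^2+xy+y^2 ≡ 0 mod n  iff  (2x+y)^2+3y^2 ≡ 0 mod 4n), tabulate u^2 mod 4n per
-- parity over half a period, sum the ordered matches per y, and halve.

-- ===== PORT A =====
def A376756 (n : Int) : Int :=
  (PySem.List.pyRange 0 n).foldl (fun c x =>
    let z := PySem.Int.mod (x ^ 2) n
    (PySem.List.pyRange x n).foldl (fun c y =>
      if PySem.Int.mod (z + y * (x + y)) n == 0 then c + 1 else c) c) 0

-- ===== PORT B =====
def A376756_alt (n : Int) : Int :=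
  let m := 4 * n
  let sq : PySem.Dict (Int × Int) Int :=
    (PySem.List.pyRange 0 (2 * n)).foldl (fun d u =>
      let k := (PySem.Int.band u 1, PySem.Int.mod (u * u) m)
      d.insert k (d.getD k 0 + 1)) PySem.Dict.empty
  let res : Int × Int :=
    (PySem.List.pyRange 0 n).foldl (fun p y =>
      (p.1 + sq.getD (PySem.Int.band y 1, PySem.Int.mod (-3 * y * y) m) 0,
       if PySem.Int.mod (3 * y * y) n == 0 then p.2 + 1 else p.2)) (0, 0)
  PySem.Int.floordiv (res.1 + res.2) 2

-- ===== PRECONDITION & SPEC =====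
def Spec_A376756 (n : Int) (out : Int) : Prop := out = A376756_alt n
instance (n : Int) (out : Int) : Decidable (Spec_A376756 n out) := by unfold Spec_A376756; infer_instance

-- ===== CLAIM (what is proved, stated in full; the proofs are below) =====
def Claim_equal_A376756 : Prop := ∀ (n : Int), Dom_A376756 n → Spec_A376756 n (A376756 n)

-- ===== LEMMAS AND PROOFS =====

-- the quadratic-form predicate over ℕ
abbrev pvQ (N x y : ℕ) : Prop := (x * x + x * y + y * y) % N = 0

lemma pvRange_cast (a b : ℕ) : PySem.List.pyRange ↑a ↑b = (List.range (b - a)).map (fun k => ((a + k : ℕ) : ℤ)) := by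
  unfold PySem.List.pyRange
  norm_num
  split_ifs with h
  · rfl
  · have h0 : b - a = 0 := by omega
    rw [h0]

lemma pvCountBridge (m : ℕ) (p : ℕ → Prop) [DecidablePred p] :
    ((Finset.range m).filter p).card = (List.range m).countP (fun x => decide (p x)) := by
  simp [Finset.card, Finset.filter, Finset.range, Multiset.range, List.countP_eq_length_filter]

lemma pvSumRange (N : ℕ) (g : ℕ → ℤ) : ((List.range N).map g).sum = ∑ x ∈ Finset.range N, g x := by
  induction N with
  | zero => simp
  | succ n ih => rw [List.range_succ, Finset.sum_range_succ, List.map_append, List.sum_append, ih]; simp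

lemma pvPred (N x y : ℕ) (hN : 0 < N) :
    (PySem.Int.mod (PySem.Int.mod ((x:ℤ) ^ 2) ↑N + ↑y * (↑x + ↑y)) ↑N == 0) = decide (pvQ N x y) := by
  have hNZ : (0:ℤ) < ↑N := by exact_mod_cast hN
  rw [PySem.Int.mod_eq_emod_of_pos hNZ, PySem.Int.mod_eq_emod_of_pos hNZ, Int.emod_add_emod]
  have h : (x:ℤ)^2 + ↑y*(↑x+↑y) = ↑(x*x + x*y + y*y) := by push_cast; ring
  rw [Bool.eq_iff_iff]
  simp only [beq_iff_eq, decide_eq_true_eq, pvQ]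
  rw [h, ← Int.natCast_mod]
  omega

lemma pvOffset (N x : ℕ) (p : ℕ → Prop) [DecidablePred p] :
    (List.range (N - x)).countP (fun k => decide (p (x+k))) = ((Finset.range N).filter (fun y => x ≤ y ∧ p y)).card := by
  have hb : ((Finset.range (N-x)).filter (fun k => p (x+k))).card
      = ((Finset.range N).filter (fun y => x ≤ y ∧ p y)).card := by
    apply Finset.card_bij (fun k _ => x + k)
    · intro k hk
      simp only [Finset.mem_filter, Finset.mem_range] at *
      exact ⟨by omega, by omega, hk.2⟩
    · intro k1 h1 k2 h2 h; omega
    · intro y hy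
      simp only [Finset.mem_filter, Finset.mem_range] at hy
      refine ⟨y - x, ?_, by omega⟩
      simp only [Finset.mem_filter, Finset.mem_range]
      have : x + (y - x) = y := by omega
      rw [this]
      exact ⟨by omega, hy.2.2⟩
  rw [← hb, pvCountBridge]

lemma pvA_eq (N : ℕ) (hN : 0 < N) :
    A376756 ↑N = ↑(∑ x ∈ Finset.range N, ((Finset.range N).filter (fun y => x ≤ y ∧ pvQ N x y)).card) := by
  unfold A376756
  rw [PySem.List.pyRange_zero_natCast, List.foldl_map]
  show (List.range N).foldl (fun (c : ℤ) (xn : ℕ) =>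
      (PySem.List.pyRange ((xn:ℤ)) ↑N).foldl (fun c y =>
        if PySem.Int.mod (PySem.Int.mod ((xn:ℤ) ^ 2) ↑N + y * ((xn:ℤ) + y)) ↑N == 0 then c + 1 else c) c) 0 = _
  have hbody : ∀ xn ∈ List.range N, ∀ (c : ℤ),
      (PySem.List.pyRange (↑xn) ↑N).foldl (fun c y =>
        if PySem.Int.mod (PySem.Int.mod ((xn:ℤ) ^ 2) ↑N + y * (↑xn + y)) ↑N == 0 then c + 1 else c) c
      = c + ↑(((Finset.range N).filter (fun y => xn ≤ y ∧ pvQ N xn y)).card) := by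
    intro xn hx c
    rw [pvRange_cast xn N, List.foldl_map]
    have h1 : (List.range (N - xn)).foldl (fun c k =>
          if PySem.Int.mod (PySem.Int.mod ((xn:ℤ) ^ 2) ↑N + ↑(xn+k) * (↑xn + ↑(xn+k))) ↑N == 0 then c + 1 else c) c
        = (List.range (N - xn)).foldl (fun c k => if decide (pvQ N xn (xn+k)) then c + 1 else c) c := by
      apply PySem.List.foldl_congr_mem
      intro acc k _
      rw [pvPred N xn (xn+k) hN]
    rw [h1, PySem.List.foldl_if_add_one, pvOffset N xn (pvQ N xn)]
  have hcong := PySem.List.foldl_congr_mem' (l := List.range N) (init := (0:ℤ))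
    (f := fun (c : ℤ) (xn : ℕ) =>
      (PySem.List.pyRange ((xn:ℤ)) ↑N).foldl (fun c y =>
        if PySem.Int.mod (PySem.Int.mod ((xn:ℤ) ^ 2) ↑N + y * ((xn:ℤ) + y)) ↑N == 0 then c + 1 else c) c)
    (g := fun (c : ℤ) (xn : ℕ) => c + ↑(((Finset.range N).filter (fun y => xn ≤ y ∧ pvQ N xn y)).card)) hbody
  rw [hcong, PySem.List.foldl_add, pvSumRange]
  push_cast
  ring

lemma pvParity (a : ℕ) : PySem.Int.band (↑a) 1 = ((a % 2 : ℕ) : ℤ) := by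
  rw [PySem.Int.band_one, PySem.Int.mod_eq_emod_of_pos (by norm_num)]
  omega

lemma pvModCast (a M : ℕ) (hM : 0 < M) : PySem.Int.mod (↑a) (↑M) = ((a % M : ℕ) : ℤ) := by
  rw [PySem.Int.mod_eq_emod_of_pos (by exact_mod_cast hM), Int.natCast_mod]

lemma pvKey2 (a b M : ℕ) :
    ((↑(a % M) : ℤ) = (-(3*(b:ℤ))) % ↑M) ↔ (a + 3*b) % M = 0 := by
  rw [Int.natCast_mod, Int.emod_eq_emod_iff_emod_sub_eq_zero]
  have h : (a:ℤ) - (-(3*(b:ℤ))) = ↑(a + 3*b) := by push_cast; ring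
  rw [h, ← Int.natCast_mod]
  omega

lemma pvB_eq (N : ℕ) (hN : 0 < N) :
    A376756_alt ↑N = PySem.Int.floordiv
      ((↑(∑ y ∈ Finset.range N, ((Finset.range (2*N)).filter (fun u => u % 2 = y % 2 ∧ (u*u + 3*(y*y)) % (4*N) = 0)).card) : ℤ)
       + ↑(((Finset.range N).filter (fun y => (3*(y*y)) % N = 0)).card)) 2 := by
  have hM : 0 < 4*N := by omega
  have h2N : (2 * (N:ℤ)) = ((2*N : ℕ) : ℤ) := by push_cast; ring
  have h4N : (4 * (N:ℤ)) = ((4*N : ℕ) : ℤ) := by push_cast; ring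
  unfold A376756_alt
  simp only [h2N, h4N]
  rw [PySem.List.pyRange_zero_natCast, PySem.List.pyRange_zero_natCast, List.foldl_map, List.foldl_map]
  -- the square table is a counter over the mapped keys
  have hsq : (List.range (2*N)).foldl (fun (d : PySem.Dict (Int × Int) Int) (un : ℕ) =>
        d.insert (PySem.Int.band (↑un) 1, PySem.Int.mod (↑un * ↑un) ((4*N : ℕ) : ℤ))
          (d.getD (PySem.Int.band (↑un) 1, PySem.Int.mod (↑un * ↑un) ((4*N : ℕ) : ℤ)) 0 + 1)) PySem.Dict.empty
      = PySem.Dict.counter ((List.range (2*N)).map (fun un =>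
          ((((un % 2 : ℕ) : ℤ)), (((un*un) % (4*N) : ℕ) : ℤ)))) := by
    rw [← PySem.Dict.foldl_insert_getD_add_one_eq_counter, List.foldl_map]
    apply PySem.List.foldl_congr_mem
    intro d un _
    have e1 : PySem.Int.band (↑un) 1 = ((un % 2 : ℕ) : ℤ) := pvParity un
    have e2 : PySem.Int.mod (↑un * ↑un) ((4*N : ℕ) : ℤ) = (((un*un) % (4*N) : ℕ) : ℤ) := by
      rw [show ((un:ℤ) * ↑un) = ((un*un : ℕ) : ℤ) from by push_cast; ring, pvModCast _ _ hM]
    rw [e1, e2]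
  rw [hsq]
  rw [PySem.List.foldl_prod_mk
    (f := fun (o : ℤ) (yn : ℕ) => o + (PySem.Dict.counter ((List.range (2*N)).map (fun un =>
          ((((un % 2 : ℕ) : ℤ)), (((un*un) % (4*N) : ℕ) : ℤ))))).getD
          (PySem.Int.band (↑yn) 1, PySem.Int.mod (-3 * ↑yn * ↑yn) ((4*N : ℕ) : ℤ)) 0)
    (g := fun (d : ℤ) (yn : ℕ) => if PySem.Int.mod (3 * ↑yn * ↑yn) ((N : ℕ) : ℤ) == 0 then d + 1 else d)]
  have hNZ : (0:ℤ) < ((N:ℕ) : ℤ) := by exact_mod_cast hN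
  -- first accumulator: the ordered count
  have hfst : (List.range N).foldl (fun (o : ℤ) (yn : ℕ) => o + (PySem.Dict.counter ((List.range (2*N)).map (fun un =>
          ((((un % 2 : ℕ) : ℤ)), (((un*un) % (4*N) : ℕ) : ℤ))))).getD
          (PySem.Int.band (↑yn) 1, PySem.Int.mod (-3 * ↑yn * ↑yn) ((4*N : ℕ) : ℤ)) 0) 0
      = ↑(∑ y ∈ Finset.range N, ((Finset.range (2*N)).filter (fun u => u % 2 = y % 2 ∧ (u*u + 3*(y*y)) % (4*N) = 0)).card) := by
    have hpt : ∀ yn ∈ List.range N, ∀ (o : ℤ), (fun (o : ℤ) (yn : ℕ) => o + (PySem.Dict.counter ((List.range (2*N)).map (fun un =>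
          ((((un % 2 : ℕ) : ℤ)), (((un*un) % (4*N) : ℕ) : ℤ))))).getD
          (PySem.Int.band (↑yn) 1, PySem.Int.mod (-3 * ↑yn * ↑yn) ((4*N : ℕ) : ℤ)) 0) o yn
        = o + ↑(((Finset.range (2*N)).filter (fun u => u % 2 = yn % 2 ∧ (u*u + 3*(yn*yn)) % (4*N) = 0)).card) := by
      intro yn _ o
      simp only
      rw [pvParity yn, PySem.Dict.getD_counter]
      congr 1
      have hc : List.count (((yn % 2 : ℕ) : ℤ), PySem.Int.mod (-3 * ↑yn * ↑yn) ((4*N : ℕ) : ℤ))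
            ((List.range (2*N)).map (fun un => ((((un % 2 : ℕ) : ℤ)), (((un*un) % (4*N) : ℕ) : ℤ))))
          = (List.range (2*N)).countP (fun un =>
              decide (un % 2 = yn % 2 ∧ (un*un + 3*(yn*yn)) % (4*N) = 0)) := by
        rw [List.count, List.countP_map]
        apply List.countP_congr
        intro un _
        have hmneg : PySem.Int.mod (-3 * ↑yn * ↑yn) ((4*N : ℕ) : ℤ) = (-(3*((yn*yn : ℕ) : ℤ))) % ((4*N : ℕ) : ℤ) := by
          rw [PySem.Int.mod_eq_emod_of_pos (by exact_mod_cast hM)]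
          congr 1
          push_cast
          ring
        simp only [Function.comp_apply, beq_iff_eq, decide_eq_true_eq, Prod.mk.injEq, hmneg]
        exact and_congr (Nat.cast_inj (R := ℤ)) (pvKey2 (un*un) (yn*yn) (4*N))
      rw [hc, ← pvCountBridge]
    have hcong := PySem.List.foldl_congr_mem' (List.range N) _ _ 0 hpt
    rw [hcong, PySem.List.foldl_add, pvSumRange]
    push_cast
    ring
  -- second accumulator: the diagonal count
  have hsnd : (List.range N).foldl (fun (d : ℤ) (yn : ℕ) =>
        if PySem.Int.mod (3 * ↑yn * ↑yn) ((N : ℕ) : ℤ) == 0 then d + 1 else d) 0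
      = ↑(((Finset.range N).filter (fun y => (3*(y*y)) % N = 0)).card) := by
    have hpt2 : (List.range N).foldl (fun (d : ℤ) (yn : ℕ) =>
          if PySem.Int.mod (3 * ↑yn * ↑yn) ((N : ℕ) : ℤ) == 0 then d + 1 else d) 0
        = (List.range N).foldl (fun (d : ℤ) (yn : ℕ) =>
          if decide ((3*(yn*yn)) % N = 0) then d + 1 else d) 0 := by
      apply PySem.List.foldl_congr_mem
      intro d yn _
      have e3 : (3 * (yn:ℤ) * ↑yn) = ((3*(yn*yn) : ℕ) : ℤ) := by push_cast; ring
      rw [e3, pvModCast _ _ hN]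
      congr 1
      rw [Bool.eq_iff_iff]
      simp only [beq_iff_eq, decide_eq_true_eq, Nat.cast_eq_zero]
      simp
    rw [hpt2, PySem.List.foldl_if_add_one, ← pvCountBridge]
    norm_num
  rw [hfst, hsnd]

lemma pvSq (a N : ℕ) : ((a % (2*N)) * (a % (2*N))) % (4*N) = (a*a) % (4*N) := by
  set r := a % (2*N) with hr
  set t := a / (2*N) with ht
  have h2 : 2*N*t + r = a := by rw [ht, hr]; exact Nat.div_add_mod a (2*N)
  have h : a * a = r * r + (4*N) * (t*r + N*t*t) := by nlinarith [h2]
  rw [h, Nat.add_mul_mod_self_left]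

lemma pvCore (N y : ℕ) (hN : 0 < N) (hy : y < N) :
    ((Finset.range (2*N)).filter (fun u => u % 2 = y % 2 ∧ (u*u + 3*(y*y)) % (4*N) = 0)).card
    = ((Finset.range N).filter (fun x => pvQ N x y)).card := by
  symm
  apply Finset.card_bij (fun x _ => (2*x + y) % (2*N))
  · intro x hx
    simp only [Finset.mem_filter, Finset.mem_range, pvQ] at hx ⊢
    refine ⟨Nat.mod_lt _ (by omega), ?_, ?_⟩
    · rw [Nat.mod_mod_of_dvd _ ⟨N, by ring⟩]
      omega
    · have hsq := pvSq (2*x + y) N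
      have hmq : ((2*x+y) % (2*N)) * ((2*x+y) % (2*N)) + 3*(y*y)
          ≡ (2*x+y)*(2*x+y) + 3*(y*y) [MOD 4*N] := Nat.ModEq.add_right _ hsq
      rw [Nat.ModEq] at hmq
      rw [hmq, show (2*x+y)*(2*x+y) + 3*(y*y) = 4*(x*x + x*y + y*y) from by ring,
        Nat.mul_mod_mul_left, hx.2]
  · intro x1 h1 x2 h2 heq
    simp only [Finset.mem_filter, Finset.mem_range] at h1 h2
    have e : ∀ x, x < N → (2*x+y) % (2*N) = if 2*x+y < 2*N then 2*x+y else 2*x+y - 2*N := by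
      intro x hx
      split_ifs with h
      · exact Nat.mod_eq_of_lt h
      · rw [Nat.mod_eq_sub_mod (by omega), Nat.mod_eq_of_lt (by omega)]
    rw [e x1 h1.1, e x2 h2.1] at heq
    split_ifs at heq <;> omega
  · intro u hu
    simp only [Finset.mem_filter, Finset.mem_range] at hu
    obtain ⟨hu2, hpar, hcond⟩ := hu
    have key : ∀ x : ℕ, (2*x+y) % (2*N) = u → ((x*x + x*y + y*y) % N = 0) := by
      intro x hxu
      have hsq := pvSq (2*x+y) N
      rw [hxu] at hsq
      have hme : (u*u + 3*(y*y)) % (4*N) = ((2*x+y)*(2*x+y) + 3*(y*y)) % (4*N) :=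
        Nat.ModEq.add_right _ hsq
      rw [show (2*x+y)*(2*x+y) + 3*(y*y) = 4*(x*x+x*y+y*y) from by ring,
        Nat.mul_mod_mul_left, hcond] at hme
      omega
    by_cases hyu : y ≤ u
    · have h2x : 2*((u-y)/2) = u - y := by omega
      have ha : (2*((u-y)/2)+y) % (2*N) = u := by
        rw [h2x, Nat.sub_add_cancel hyu]
        exact Nat.mod_eq_of_lt hu2
      refine ⟨(u - y)/2, ?_, ha⟩
      simp only [Finset.mem_filter, Finset.mem_range, pvQ]
      exact ⟨by omega, key _ ha⟩
    · have h2x : 2*((u + 2*N - y)/2) = u + 2*N - y := by omega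
      have ha : (2*((u + 2*N - y)/2)+y) % (2*N) = u := by
        rw [h2x, show u + 2*N - y + y = u + 2*N from by omega, Nat.add_mod_right]
        exact Nat.mod_eq_of_lt hu2
      refine ⟨(u + 2*N - y)/2, ?_, ha⟩
      simp only [Finset.mem_filter, Finset.mem_range, pvQ]
      exact ⟨by omega, key _ ha⟩

lemma pvHalf (N : ℕ) :
    (∑ y ∈ Finset.range N, ((Finset.range N).filter (fun x => pvQ N x y)).card)
    + ((Finset.range N).filter (fun y => (3*(y*y)) % N = 0)).card
    = 2 * ∑ x ∈ Finset.range N, ((Finset.range N).filter (fun y => x ≤ y ∧ pvQ N x y)).card := by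
  set F : ℕ → ℕ → ℕ := fun x y => if pvQ N x y then 1 else 0 with hF
  have hFsymm : ∀ x y, F x y = F y x := by
    intro x y
    simp only [hF]
    congr 1
    unfold pvQ
    rw [show y*y + y*x + x*x = x*x + x*y + y*y from by ring]
  -- A's per-x count as a triangle sum
  have hA : ∑ x ∈ Finset.range N, ((Finset.range N).filter (fun y => x ≤ y ∧ pvQ N x y)).card
      = ∑ x ∈ Finset.Ico 0 N, ∑ y ∈ Finset.Ico x N, F x y := by
    rw [Finset.range_eq_Ico]
    apply Finset.sum_congr rfl
    intro x hx
    have hxN : x ≤ N := by simp only [Finset.mem_Ico] at hx; omega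
    rw [Finset.card_filter,
      ← Finset.sum_Ico_consecutive (fun y => if x ≤ y ∧ pvQ N x y then 1 else 0) (Nat.zero_le x) hxN]
    have h1 : ∑ y ∈ Finset.Ico 0 x, (if x ≤ y ∧ pvQ N x y then 1 else 0) = 0 := by
      apply Finset.sum_eq_zero
      intro y hy
      simp only [Finset.mem_Ico] at hy
      simp [show ¬(x ≤ y ∧ pvQ N x y) from by intro h; omega]
    rw [h1, zero_add]
    apply Finset.sum_congr rfl
    intro y hy
    simp only [Finset.mem_Ico] at hy
    simp [hF, hy.1]
  -- the triangle sum, transposed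
  have htri : ∑ x ∈ Finset.Ico 0 N, ∑ y ∈ Finset.Ico x N, F x y
      = ∑ y ∈ Finset.range N, ∑ x ∈ Finset.range (y+1), F x y := by
    rw [Finset.sum_Ico_Ico_comm, Finset.range_eq_Ico]
  -- each full column splits at the diagonal
  have hcol : ∀ y ∈ Finset.range N, ((Finset.range N).filter (fun x => pvQ N x y)).card
      = ∑ x ∈ Finset.range (y+1), F x y + ∑ x ∈ Finset.Ico (y+1) N, F x y := by
    intro y hy
    simp only [Finset.mem_range] at hy
    rw [Finset.card_filter]
    show ∑ x ∈ Finset.range N, F x y = _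
    rw [Finset.range_eq_Ico,
      ← Finset.sum_Ico_consecutive (fun x => F x y) (Nat.zero_le (y+1)) (by omega)]
  -- the lower-with-diagonal part equals the triangle, by symmetry
  have hup : (∑ y ∈ Finset.range N, ∑ x ∈ Finset.Ico (y+1) N, F x y)
      + ∑ y ∈ Finset.range N, F y y
      = ∑ y ∈ Finset.range N, ∑ x ∈ Finset.range (y+1), F x y := by
    rw [← Finset.sum_add_distrib]
    have h1 : ∀ y ∈ Finset.range N, (∑ x ∈ Finset.Ico (y+1) N, F x y) + F y y
        = ∑ x ∈ Finset.Ico y N, F x y := by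
      intro y hy
      simp only [Finset.mem_range] at hy
      rw [Finset.sum_eq_sum_Ico_succ_bot (by omega : y < N)]
      ring
    rw [Finset.sum_congr rfl h1]
    have h2 := Finset.sum_Ico_Ico_comm 0 N (fun y x => F x y)
    rw [Finset.range_eq_Ico, h2, ← Finset.range_eq_Ico]
    apply Finset.sum_congr rfl
    intro x _
    exact Finset.sum_congr rfl (fun y _ => hFsymm x y)
  -- the diagonal count is the diagonal sum
  have hdiag : ((Finset.range N).filter (fun y => (3*(y*y)) % N = 0)).card
      = ∑ y ∈ Finset.range N, F y y := by
    rw [Finset.card_filter]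
    apply Finset.sum_congr rfl
    intro y _
    congr 1
    simp only [eq_iff_iff]
    unfold pvQ
    rw [show y * y + y * y + y * y = 3*(y*y) from by ring]
  rw [Finset.sum_congr rfl hcol, Finset.sum_add_distrib, hdiag, hA, htri, add_assoc, hup, two_mul]

theorem pvMain (n : Int) : A376756 n = A376756_alt n := by
  by_cases hn : 0 < n
  · have hcast : ((n.toNat : ℕ) : ℤ) = n := Int.toNat_of_nonneg (le_of_lt hn)
    have hN : 0 < n.toNat := by omega
    rw [← hcast, pvA_eq n.toNat hN, pvB_eq n.toNat hN]
    have hT : (∑ y ∈ Finset.range n.toNat, ((Finset.range (2*n.toNat)).filter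
          (fun u => u % 2 = y % 2 ∧ (u*u + 3*(y*y)) % (4*n.toNat) = 0)).card)
        = ∑ y ∈ Finset.range n.toNat, ((Finset.range n.toNat).filter (fun x => pvQ n.toNat x y)).card :=
      Finset.sum_congr rfl (fun y hy => pvCore n.toNat y hN (Finset.mem_range.mp hy))
    rw [hT]
    have hhalf := pvHalf n.toNat
    have hhalf' : (↑(∑ y ∈ Finset.range n.toNat, ((Finset.range n.toNat).filter (fun x => pvQ n.toNat x y)).card) : ℤ)
        + ↑(((Finset.range n.toNat).filter (fun y => (3*(y*y)) % n.toNat = 0)).card)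
        = 2 * ↑(∑ x ∈ Finset.range n.toNat, ((Finset.range n.toNat).filter (fun y => x ≤ y ∧ pvQ n.toNat x y)).card) := by
      exact_mod_cast congrArg (Nat.cast : ℕ → ℤ) hhalf
    rw [hhalf', PySem.Int.floordiv_eq_ediv_of_pos (by norm_num)]
    omega
  · have hn' : n ≤ 0 := by omega
    unfold A376756 A376756_alt
    rw [PySem.List.pyRange_one_eq_nil hn', PySem.List.pyRange_one_eq_nil (show 2*n ≤ 0 by omega)]
    simp [PySem.Int.floordiv]

-- ===== VERDICT (by name: the statement is the Claim_ definition above) =====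
theorem A376756_spec : Claim_equal_A376756 := by
  intro n _
  unfold Spec_A376756
  exact pvMain n
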